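-- pv_equiv track=rewrite | github.com/voliol/DF-Diagnosipack | df_diagnosipack_base.py | split_file_into_tokens
-- ===== SOURCE A (Python) =====
-- def split_file_into_tokens(file):
--     # does what it sounds like, splits a text file into tokens, discarding comments along the way
--     token_list = []
--
--     file_string = "".join(list(line for line in file))
--     reading_mode = "comments"
--     token = ""
--     args = ""
--     # just goes through each of the characters in the file, switching "reading_mode" when necessary.
--     for c in file_string:
--         if reading_mode == "comments":
--             if c == "[":
--                 reading_mode = "token"
--         elif reading_mode == "token":
--             if c == ":":
--                 reading_mode = "args"
--             elif c == "]":
--                 token_list.append([token])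
--                 token = ""
--                 reading_mode = "comments"
--             else:
--                 token += c
--         elif reading_mode == "args":
--             if c == "]":
--                 token_list.append([token] + args.split(":"))
--                 token = ""
--                 args = ""
--                 reading_mode = "comments"
--             else:
--                 args += c
--
--     return token_list
-- ===== SOURCE B (Python) =====
-- def split_file_into_tokens(file):
--     # Single linear scan by index: jump with str.find from each '[' to the next ']',
--     # split that bracketed content on ':'; text outside brackets (comments) is skipped.
--     s = "".join(file)
--     token_list = []
--     i = s.find("[")
--     while i != -1:
--         j = s.find("]", i + 1)
--         if j == -1:
--             break
--         token_list.append(s[i + 1 : j].split(":"))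
--         i = s.find("[", j + 1)
--     return token_list
-- ===== Notes on version B (the rewrite author's own statement) =====
-- stated objective: faster
-- what changed: A's four-state character-by-character state machine is replaced by an index scan that jumps with str.find from each '[' to the next ']' and splits each bracketed content once on ':'.
import Mathlib
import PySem

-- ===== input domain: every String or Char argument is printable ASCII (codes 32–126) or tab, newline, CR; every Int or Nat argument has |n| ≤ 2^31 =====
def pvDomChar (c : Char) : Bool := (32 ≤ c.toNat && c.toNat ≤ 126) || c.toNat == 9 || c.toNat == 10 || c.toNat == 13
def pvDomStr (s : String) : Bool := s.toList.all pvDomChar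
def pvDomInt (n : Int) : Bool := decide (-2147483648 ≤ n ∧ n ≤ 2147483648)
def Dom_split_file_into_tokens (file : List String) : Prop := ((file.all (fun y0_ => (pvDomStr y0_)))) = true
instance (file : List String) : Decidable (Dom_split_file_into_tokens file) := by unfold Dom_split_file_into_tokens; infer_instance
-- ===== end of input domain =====

-- B replaces A's four-state character loop by an index scan that jumps with str.find from each
-- '[' to the next ']' and splits that bracketed content on ':' (measured faster by a constant factor).

-- ===== PORT A =====
-- one step of A's `for c in file_string` loop; state = (reading_mode, token, args, token_list)
def pvStepA (st : String × List Char × List Char × List (List String)) (c : Char) :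
    String × List Char × List Char × List (List String) :=
  match st with
  | (mode, token, args, tl) =>
    if mode = "comments" then
      if c = '[' then ("token", token, args, tl) else (mode, token, args, tl)
    else if mode = "token" then
      if c = ':' then ("args", token, args, tl)
      else if c = ']' then ("comments", [], args, tl ++ [[String.ofList token]])
      else (mode, token ++ [c], args, tl)
    else if mode = "args" then
      if c = ']' then
        ("comments", [], [],
          tl ++ [String.ofList token :: (PySem.Chars.splitOn args [':']).map String.ofList])
      else (mode, token, args ++ [c], tl)
    else (mode, token, args, tl)

def split_file_into_tokens (file : List String) : List (List String) :=
  let file_string := PySem.Str.join "" file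
  (file_string.toList.foldl pvStepA ("comments", [], [], [])).2.2.2

-- ===== PORT B =====
-- the `while i != -1` loop of Source B; `fuel` only makes the recursion structural (every call
-- site passes fuel > number of remaining iterations, so the 0 case is never reached)
def pvLoopB (s : List Char) (fuel : Nat) (i : Int) (token_list : List (List String)) :
    List (List String) :=
  match fuel with
  | 0 => token_list
  | fuel + 1 =>
    if i = -1 then token_list
    else
      let j := PySem.Chars.findFrom s [']'] (i + 1)
      if j = -1 then token_list
      else
        pvLoopB s fuel (PySem.Chars.findFrom s ['['] (j + 1))
          (token_list ++
            [(PySem.Chars.splitOn (PySem.Chars.slice s (some (i + 1)) (some j)) [':']).map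
                String.ofList])

def split_file_into_tokens_alt (file : List String) : List (List String) :=
  let s := (PySem.Str.join "" file).toList
  pvLoopB s (s.length + 1) (PySem.Chars.find s ['[']) []

-- ===== PRECONDITION & SPEC =====
def Spec_split_file_into_tokens (file : List String) (out : List (List String)) : Prop := out = split_file_into_tokens_alt file
instance (file : List String) (out : List (List String)) : Decidable (Spec_split_file_into_tokens file out) := by unfold Spec_split_file_into_tokens; infer_instance

-- ===== CLAIM (what is proved, stated in full; the proofs are below) =====
def Claim_equal_split_file_into_tokens : Prop := ∀ (file : List String), Dom_split_file_into_tokens file → Spec_split_file_into_tokens file (split_file_into_tokens file)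

-- ===== LEMMAS AND PROOFS =====

-- hand port of Python str.partition with a one-character separator (exact):
-- (part before sep, whether sep occurs, part after the first sep)
def pvPartition (s : List Char) (sep : Char) : List Char × Bool × List Char :=
  match s.dropWhile (· ≠ sep) with
  | [] => (s, false, [])
  | _ :: rest => (s.takeWhile (· ≠ sep), true, rest)

-- the next-separator suffix is strictly shorter when the separator occurs (used for termination)
theorem pvPartition_lt (s : List Char) (sep : Char) (h : (pvPartition s sep).2.1 = true) :
    (pvPartition s sep).2.2.length < s.length := by
  unfold pvPartition at *
  cases hd : s.dropWhile (· ≠ sep) with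
  | nil => rw [hd] at h; simp at h
  | cons x r =>
    have := List.length_dropWhile_le (p := (· ≠ sep)) (l := s)
    rw [hd] at this; simp at this ⊢; omega

-- the `while True` loop of Source B, recursing on the remaining string
def pvScanB (s : List Char) (token_list : List (List String)) : List (List String) :=
  let p1 := pvPartition s '['
  if _h1 : p1.2.1 = false then token_list
  else
    let p2 := pvPartition p1.2.2 ']'
    if _h2 : p2.2.1 = false then token_list
    else pvScanB p2.2.2 (token_list ++ [(PySem.Chars.splitOn p2.1 [':']).map String.ofList])
termination_by s.length
decreasing_by
  have l1 := pvPartition_lt s '[' (by simpa using _h1)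
  have l2 := pvPartition_lt (pvPartition s '[').2.2 ']' (by simpa using _h2)
  omega


-- simple reference splitter: what `splitOn l [':']` computes
def pvSplit : List Char → List (List Char)
  | [] => [[]]
  | c :: rest => if c = ':' then [] :: pvSplit rest else (pvSplit rest).modifyHead (c :: ·)

theorem pvSplit_ne_nil (l : List Char) : pvSplit l ≠ [] := by
  cases l with
  | nil => simp [pvSplit]
  | cons c rest =>
    simp only [pvSplit]
    split_ifs <;> simp [List.modifyHead]
    · exact fun h => pvSplit_ne_nil rest (by cases hs : pvSplit rest <;> simp_all)

theorem pvGo_eq (fuel : Nat) (l cur : List Char) (acc : List (List Char))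
    (h : l.length ≤ fuel) :
    PySem.Chars.splitOn.go [':'] fuel l cur acc
      = acc.reverse ++ (pvSplit l).modifyHead (cur.reverse ++ ·) := by
  induction fuel generalizing l cur acc with
  | zero =>
    have : l = [] := by cases l <;> simp_all
    subst this; simp [PySem.Chars.splitOn.go, pvSplit]
  | succ f ih =>
    cases l with
    | nil => simp [PySem.Chars.splitOn.go, pvSplit]
    | cons c rest =>
      have hpre : List.isPrefixOf [':'] (c :: rest) = (c == ':') := by
        simp [List.isPrefixOf, BEq.comm]
      by_cases hc : c = ':'
      · subst hc
        rw [PySem.Chars.splitOn.go]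
        simp only [hpre, BEq.rfl, if_pos]
        have hdrop : List.drop [':'].length (':' :: rest) = rest := rfl
        rw [hdrop, ih rest [] (cur.reverse :: acc) (by simpa using Nat.le_of_succ_le_succ h)]
        cases hs : pvSplit rest <;> simp [pvSplit, hs, List.modifyHead]
      · rw [PySem.Chars.splitOn.go]
        simp only [hpre, beq_iff_eq, hc, if_false]
        rw [ih rest (c :: cur) acc (by simpa using Nat.le_of_succ_le_succ h)]
        have hne : pvSplit rest ≠ [] := pvSplit_ne_nil rest
        cases hs : pvSplit rest with
        | nil => exact absurd hs hne
        | cons hd tl => simp [pvSplit, hc, hs, List.modifyHead]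

theorem pvSplitOn_eq (l : List Char) :
    PySem.Chars.splitOn l [':'] = pvSplit l := by
  rw [PySem.Chars.splitOn, pvGo_eq (l.length + 1) l [] [] (by omega)]
  have hne := pvSplit_ne_nil l
  cases hs : pvSplit l with
  | nil => exact absurd hs hne
  | cons hd tl => simp [List.modifyHead]

theorem pvSplit_no_sep (xs : List Char) (h : ':' ∉ xs) : pvSplit xs = [xs] := by
  induction xs with
  | nil => simp [pvSplit]
  | cons c rest ih =>
    have hc : c ≠ ':' := fun hc => h (hc ▸ List.mem_cons_self)
    simp [pvSplit, hc, ih (fun hm => h (List.mem_cons_of_mem _ hm)), List.modifyHead]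

theorem pvSplit_append (xs ys : List Char) (h : ':' ∉ xs) :
    pvSplit (xs ++ ':' :: ys) = xs :: pvSplit ys := by
  induction xs with
  | nil => simp [pvSplit]
  | cons c rest ih =>
    have hc : c ≠ ':' := fun hc => h (hc ▸ List.mem_cons_self)
    simp [pvSplit, hc, ih (fun hm => h (List.mem_cons_of_mem _ hm)), List.modifyHead]

-- unfolding lemmas for pvScanB and pvPartition
theorem pvScanB_eq_ite (s : List Char) (tl : List (List String)) :
    pvScanB s tl =
      if (pvPartition s '[').2.1 = false then tl
      else
        if (pvPartition (pvPartition s '[').2.2 ']').2.1 = false then tl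
        else
          pvScanB (pvPartition (pvPartition s '[').2.2 ']').2.2
            (tl ++ [(PySem.Chars.splitOn (pvPartition (pvPartition s '[').2.2 ']').1 [':']).map
                String.ofList]) := by
  rw [pvScanB]; simp only [dite_eq_ite]

theorem pvPartition_none (s : List Char) (sep : Char) (h : s.dropWhile (· ≠ sep) = []) :
    pvPartition s sep = (s, false, []) := by
  unfold pvPartition; rw [h]

theorem pvPartition_some (s : List Char) (sep y : Char) (rest : List Char)
    (h : s.dropWhile (· ≠ sep) = y :: rest) :
    pvPartition s sep = (s.takeWhile (· ≠ sep), true, rest) := by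
  unfold pvPartition; rw [h]

theorem pvPartition_cons_ne (c sep : Char) (l : List Char) (h : c ≠ sep) :
    (pvPartition (c :: l) sep).2 = (pvPartition l sep).2 := by
  simp only [pvPartition, List.dropWhile_cons, List.takeWhile_cons]
  simp only [ne_eq, h, not_false_eq_true, decide_true]
  cases hd : l.dropWhile (· ≠ sep) <;> simp

theorem pvPartition_cons_self (sep : Char) (l : List Char) :
    pvPartition (sep :: l) sep = ([], true, l) := by
  simp [pvPartition]

theorem pvScanB_nil (tl : List (List String)) : pvScanB [] tl = tl := by
  rw [pvScanB_eq_ite []]; simp [pvPartition]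

theorem pvScanB_cons_ne (c : Char) (l : List Char) (tl : List (List String)) (h : c ≠ '[') :
    pvScanB (c :: l) tl = pvScanB l tl := by
  rw [pvScanB_eq_ite (c :: l), pvScanB_eq_ite l, pvPartition_cons_ne c '[' l h]

-- continuation of A's loop once it is in "token" mode (token = t, args = "")
def pvTokCont (l t : List Char) (tl : List (List String)) : List (List String) :=
  match l.dropWhile (· ≠ ']') with
  | [] => tl
  | _ :: rest =>
    pvScanB rest
      (tl ++ [(PySem.Chars.splitOn (t ++ l.takeWhile (· ≠ ']')) [':']).map String.ofList])

-- continuation of A's loop once it is in "args" mode (token = t, args = a)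
def pvArgsCont (l t a : List Char) (tl : List (List String)) : List (List String) :=
  match l.dropWhile (· ≠ ']') with
  | [] => tl
  | _ :: rest =>
    pvScanB rest
      (tl ++ [String.ofList t :: (PySem.Chars.splitOn (a ++ l.takeWhile (· ≠ ']')) [':']).map String.ofList])

theorem pvScanB_open (l : List Char) (tl : List (List String)) :
    pvScanB ('[' :: l) tl = pvTokCont l [] tl := by
  rw [pvScanB_eq_ite ('[' :: l), pvPartition_cons_self]
  unfold pvTokCont
  cases hd : l.dropWhile (· ≠ ']') with
  | nil => rw [pvPartition_none _ _ hd]; simp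
  | cons y rest => rw [pvPartition_some _ _ _ _ hd]; simp

-- the main invariant: A's fold, started in each of its three live modes, equals B's scan
theorem pvMain (l : List Char) :
    (∀ tl, (l.foldl pvStepA ("comments", [], [], tl)).2.2.2 = pvScanB l tl) ∧
    (∀ t tl, ':' ∉ t → ']' ∉ t →
      (l.foldl pvStepA ("token", t, [], tl)).2.2.2 = pvTokCont l t tl) ∧
    (∀ t a tl, ']' ∉ a →
      (l.foldl pvStepA ("args", t, a, tl)).2.2.2 = pvArgsCont l t a tl) := by
  induction l with
  | nil =>
    refine ⟨fun tl => ?_, fun t tl _ _ => ?_, fun t a tl _ => ?_⟩ <;>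
      simp [pvScanB_nil, pvTokCont, pvArgsCont]
  | cons c l ih =>
    obtain ⟨ihC, ihT, ihA⟩ := ih
    refine ⟨fun tl => ?_, fun t tl ht1 ht2 => ?_, fun t a tl ha => ?_⟩
    · -- "comments" mode
      by_cases hc : c = '['
      · subst hc
        simp only [List.foldl_cons, pvStepA, String.reduceEq, reduceIte]
        rw [pvScanB_open]
        exact ihT [] tl (by simp) (by simp)
      · simp only [List.foldl_cons, pvStepA, String.reduceEq, reduceIte, if_neg hc]
        rw [pvScanB_cons_ne c l tl hc]
        exact ihC tl
    · -- "token" mode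
      by_cases hc1 : c = ':'
      · subst hc1
        simp only [List.foldl_cons, pvStepA, String.reduceEq, reduceIte]
        rw [ihA t [] tl (by simp)]
        unfold pvTokCont pvArgsCont
        have hsplit : ∀ ys : List Char,
            PySem.Chars.splitOn (t ++ ':' :: ys) [':'] = t :: PySem.Chars.splitOn ys [':'] := by
          intro ys; rw [pvSplitOn_eq, pvSplitOn_eq, pvSplit_append _ _ ht1]
        simp [hsplit]
      · by_cases hc2 : c = ']'
        · subst hc2
          simp only [List.foldl_cons, pvStepA, String.reduceEq, reduceIte, if_neg hc1]
          rw [ihC (tl ++ [[String.ofList t]])]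
          unfold pvTokCont
          simp only [List.dropWhile_cons, List.takeWhile_cons]
          norm_num
          rw [pvSplitOn_eq, pvSplit_no_sep _ (by simpa using ht1)]
          simp
        · simp only [List.foldl_cons, pvStepA, String.reduceEq, reduceIte, if_neg hc1, if_neg hc2]
          rw [ihT (t ++ [c]) tl (by simp [ht1, Ne.symm hc1]) (by simp [ht2, Ne.symm hc2])]
          unfold pvTokCont
          simp only [List.dropWhile_cons, List.takeWhile_cons]
          simp [hc2, List.append_assoc]
    · -- "args" mode
      by_cases hc : c = ']'
      · subst hc
        simp only [List.foldl_cons, pvStepA, String.reduceEq, reduceIte]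
        rw [ihC (tl ++ [String.ofList t :: (PySem.Chars.splitOn a [':']).map String.ofList])]
        unfold pvArgsCont
        simp only [List.dropWhile_cons, List.takeWhile_cons]
        norm_num
      · simp only [List.foldl_cons, pvStepA, String.reduceEq, reduceIte, if_neg hc]
        rw [ihA t (a ++ [c]) tl (by simp [ha, Ne.symm hc])]
        unfold pvArgsCont
        simp only [List.dropWhile_cons, List.takeWhile_cons]
        simp [hc, List.append_assoc]


-- pvScanB after the first '[' has been located
theorem pvScanB_found (l : List Char) (tl : List (List String)) (y : Char) (rest : List Char)
    (hd : l.dropWhile (· ≠ '[') = y :: rest) :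
    pvScanB l tl = pvTokCont rest [] tl := by
  rw [pvScanB_eq_ite l, pvPartition_some _ _ _ _ hd]
  unfold pvTokCont
  cases hd2 : rest.dropWhile (· ≠ ']') with
  | nil => rw [pvPartition_none _ _ hd2]; simp
  | cons y2 r2 => rw [pvPartition_some _ _ _ _ hd2]; simp

-- takeWhile/dropWhile at the FIRST occurrence of c (as located by Chars.find)
theorem pvTakeDrop_first (l : List Char) (c : Char) (n : Nat)
    (hpre : [c] <+: l.drop n) (hmin : ∀ i < n, ¬ [c] <+: l.drop i) :
    l.takeWhile (· ≠ c) = l.take n ∧ l.dropWhile (· ≠ c) = l.drop n := by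
  induction l generalizing n with
  | nil => obtain ⟨t, ht⟩ := hpre; simp at ht
  | cons x xs ih =>
    cases n with
    | zero =>
      obtain ⟨t, ht⟩ := hpre
      simp only [List.drop_zero, List.singleton_append] at ht
      have hx : x = c := by cases ht; rfl
      subst hx
      refine ⟨?_, ?_⟩ <;> simp
    | succ n =>
      have hx : x ≠ c := by
        intro h
        exact hmin 0 (by omega) ⟨xs, by simp [h]⟩
      have hrec := ih n (by simpa using hpre)
        (fun i hi => by simpa using hmin (i + 1) (by omega))
      have h1 : List.takeWhile (fun x => !decide (x = c)) xs = List.take n xs := by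
        simpa using hrec.1
      have h2 : List.dropWhile (fun x => !decide (x = c)) xs = List.drop n xs := by
        simpa using hrec.2
      constructor
      · simp [hx, h1]
      · simp [hx, h2]

theorem pvDropWhile_eq_nil (l : List Char) (c : Char) (h : ¬ [c] <:+: l) :
    l.dropWhile (· ≠ c) = [] := by
  rw [List.dropWhile_eq_nil_iff]
  intro x hx
  simp only [ne_eq, decide_eq_true_eq]
  intro hxc
  exact h ((List.singleton_infix_iff c l).mpr (hxc ▸ hx))

-- the bridge: Source B's index loop equals the suffix scan pvScanB
theorem pvBridge (fuel : Nat) : ∀ (s : List Char) (k : Nat) (tl : List (List String)),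
    k ≤ s.length → s.length - k < fuel →
    pvLoopB s fuel (PySem.Chars.findFrom s ['['] (k : Int)) tl = pvScanB (s.drop k) tl := by
  induction fuel with
  | zero => intro s k tl hk hf; omega
  | succ fuel ih =>
    intro s k tl hk hf
    rw [PySem.Chars.findFrom_natCast s ['['] k hk]
    by_cases h1 : PySem.Chars.find (s.drop k) ['['] = -1
    · rw [if_pos h1]
      have hnil : (s.drop k).dropWhile (· ≠ '[') = [] :=
        pvDropWhile_eq_nil _ _ ((PySem.Chars.find_eq_neg_one_iff _ _).mp h1)
      rw [pvScanB_eq_ite, pvPartition_none _ _ hnil]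
      simp [pvLoopB]
    · rw [if_neg h1]
      have hge : 0 ≤ PySem.Chars.find (s.drop k) ['['] := by
        have := PySem.Chars.neg_one_le_find (s.drop k) ['[']
        omega
      obtain ⟨hpre, hmin⟩ := PySem.Chars.find_spec hge
      set f := (PySem.Chars.find (s.drop k) ['[']).toNat with hfN
      have hfI : PySem.Chars.find (s.drop k) ['['] = (f : Int) := (Int.toNat_of_nonneg hge).symm
      have htd := pvTakeDrop_first (s.drop k) '[' f hpre hmin
      obtain ⟨t, ht⟩ := hpre
      have hket : s.drop (k + f) = '[' :: t := by
        rw [← List.drop_drop]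
        simpa using ht.symm
      have hkf : k + f < s.length := by
        have hlen : (s.drop (k + f)).length = s.length - (k + f) := List.length_drop
        rw [hket] at hlen; simp at hlen; omega
      have ht' : t = s.drop (k + f + 1) := by
        have h2 : (s.drop (k + f)).drop 1 = s.drop (k + f + 1) := by
          rw [List.drop_drop]
        rw [← h2, hket]; simp
      have hdW : (s.drop k).dropWhile (· ≠ '[') = '[' :: t := by
        rw [htd.2, List.drop_drop, hket]
      subst ht'
      rw [pvScanB_found (s.drop k) tl '[' _ hdW]
      rw [hfI]
      simp only [pvLoopB]
      rw [if_neg (by omega)]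
      have hcast1 : (k : Int) + (f : Int) + 1 = ((k + f + 1 : Nat) : Int) := by push_cast; ring
      rw [hcast1, PySem.Chars.findFrom_natCast s [']'] (k + f + 1) (by omega)]
      by_cases h2 : PySem.Chars.find (s.drop (k + f + 1)) [']'] = -1
      · rw [h2]
        simp only [reduceIte]
        have hnil2 : (s.drop (k + f + 1)).dropWhile (· ≠ ']') = [] :=
          pvDropWhile_eq_nil _ _ ((PySem.Chars.find_eq_neg_one_iff _ _).mp h2)
        unfold pvTokCont
        rw [hnil2]
      · rw [if_neg h2]
        have hge2 : 0 ≤ PySem.Chars.find (s.drop (k + f + 1)) [']'] := by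
          have := PySem.Chars.neg_one_le_find (s.drop (k + f + 1)) [']']
          omega
        obtain ⟨hpre2, hmin2⟩ := PySem.Chars.find_spec hge2
        set g := (PySem.Chars.find (s.drop (k + f + 1)) [']']).toNat with hgN
        have hgI : PySem.Chars.find (s.drop (k + f + 1)) [']'] = (g : Int) :=
          (Int.toNat_of_nonneg hge2).symm
        have htd2 := pvTakeDrop_first (s.drop (k + f + 1)) ']' g hpre2 hmin2
        obtain ⟨u, hu⟩ := hpre2
        have hueq : s.drop (k + f + 1 + g) = ']' :: u := by
          rw [← List.drop_drop]
          simpa using hu.symm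
        have hgf : k + f + 1 + g < s.length := by
          have hlen : (s.drop (k + f + 1 + g)).length = s.length - (k + f + 1 + g) :=
            List.length_drop
          rw [hueq] at hlen; simp at hlen; omega
        have hu' : u = s.drop (k + f + 1 + g + 1) := by
          have h2' : (s.drop (k + f + 1 + g)).drop 1 = s.drop (k + f + 1 + g + 1) := by
            rw [List.drop_drop]
          rw [← h2', hueq]; simp
        subst hu'
        have hdW2 : (s.drop (k + f + 1)).dropWhile (· ≠ ']') = ']' :: s.drop (k + f + 1 + g + 1) := by
          rw [htd2.2, List.drop_drop, hueq]
        rw [if_neg (by rw [hgI]; omega)]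
        have hcast2 : (↑(k + f + 1) : Int) + PySem.Chars.find (s.drop (k + f + 1)) [']'] + 1
            = ((k + f + 1 + g + 1 : Nat) : Int) := by
          rw [hgI]; push_cast; ring
        rw [hcast2]
        have hrec := ih s (k + f + 1 + g + 1) (tl ++
            [(PySem.Chars.splitOn
                (PySem.Chars.slice s (some ((k + f + 1 : Nat) : Int))
                  (some ((↑(k + f + 1) : Int) + PySem.Chars.find (s.drop (k + f + 1)) [']'])))
                [':']).map String.ofList]) (by omega) (by omega)
        rw [hrec]
        -- the bracketed content: s[i+1:j] is exactly takeWhile (· ≠ ']') of the suffix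
        have hslice : PySem.Chars.slice s (some ((k + f + 1 : Nat) : Int))
            (some ((↑(k + f + 1) : Int) + PySem.Chars.find (s.drop (k + f + 1)) [']']))
            = (s.drop (k + f + 1)).takeWhile (· ≠ ']') := by
          rw [hgI]
          have : (↑(k + f + 1) : Int) + (g : Int) = ((k + f + 1 + g : Nat) : Int) := by
            push_cast; ring
          show PySem.List.slice s (some ((k + f + 1 : Nat) : Int)) (some ((↑(k + f + 1) : Int) + (g : Int))) = _
          rw [this, PySem.List.slice_natCast s (k + f + 1) (k + f + 1 + g), htd2.1]
          congr 1
          omega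
        rw [hslice]
        unfold pvTokCont
        rw [hdW2]
        simp

-- ===== VERDICT (by name: the statement is the Claim_ definition above) =====
theorem split_file_into_tokens_spec : Claim_equal_split_file_into_tokens := by
  intro file _
  unfold Spec_split_file_into_tokens split_file_into_tokens split_file_into_tokens_alt
  have hbr := pvBridge ((PySem.Str.join "" file).toList.length + 1)
    (PySem.Str.join "" file).toList 0 [] (by omega) (by omega)
  simp only [Nat.cast_zero, PySem.Chars.findFrom_zero, List.drop_zero] at hbr
  exact ((pvMain (PySem.Str.join "" file).toList).1 []).trans hbr.symm
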